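-- pv_equiv track=rewrite | github.com/travisfleish/octagon_azure_poc | archive/previous-version/sow_taxonomy_analyzer.py | _categorize_deliverables
-- ===== SOURCE A (Python) =====
-- from typing import Dict, List, Set, Any, Optional
--
-- def _categorize_deliverables(deliverables: List[str]) -> Dict[str, List[str]]:
--     """Categorize deliverables by type"""
--     categories = {
--         "Reports & Analysis": [],
--         "Creative Assets": [],
--         "Strategic Documents": [],
--         "Technical Deliverables": [],
--         "Other": []
--     }
--
--     for deliverable in deliverables:
--         deliverable_lower = deliverable.lower()
--         if any(keyword in deliverable_lower for keyword in ['report', 'analysis', 'study', 'audit']):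
--             categories["Reports & Analysis"].append(deliverable)
--         elif any(keyword in deliverable_lower for keyword in ['creative', 'design', 'brand', 'campaign', 'materials']):
--             categories["Creative Assets"].append(deliverable)
--         elif any(keyword in deliverable_lower for keyword in ['strategy', 'plan', 'roadmap', 'framework']):
--             categories["Strategic Documents"].append(deliverable)
--         elif any(keyword in deliverable_lower for keyword in ['system', 'platform', 'tool', 'software']):
--             categories["Technical Deliverables"].append(deliverable)
--         else:
--             categories["Other"].append(deliverable)
--
--     return {k: v for k, v in categories.items() if v}  # Remove empty categories
-- ===== SOURCE B (Python) =====
-- CATEGORIES = [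
--     ("Reports & Analysis", ['report', 'analysis', 'study', 'audit']),
--     ("Creative Assets", ['creative', 'design', 'brand', 'campaign', 'materials']),
--     ("Strategic Documents", ['strategy', 'plan', 'roadmap', 'framework']),
--     ("Technical Deliverables", ['system', 'platform', 'tool', 'software']),
-- ]
--
--
-- def _category_index(deliverable):
--     """Index of the first category whose keyword list matches; 4 means 'Other'."""
--     deliverable_lower = deliverable.lower()
--     i = 0
--     for _, keywords in CATEGORIES:
--         if any(keyword in deliverable_lower for keyword in keywords):
--             return i
--         i += 1
--     return i
--
--
-- def _categorize_deliverables(deliverables):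
--     """Categorize deliverables by type (category-major: one filter pass per bucket)."""
--     names = [name for name, _ in CATEGORIES] + ["Other"]
--     result = {}
--     for i, name in enumerate(names):
--         group = [d for d in deliverables if _category_index(d) == i]
--         if group:
--             result[name] = group
--     return result
-- ===== Notes on version B (the rewrite author's own statement) =====
-- stated objective: alternative
-- what changed: Replaced the elif-ladder single pass that appends into a pre-built dict with a category-major scheme: a keyword table, a first-match category-index function, and one filter pass per bucket building the result dict directly without a post-filter of empty buckets.
import Mathlib
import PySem

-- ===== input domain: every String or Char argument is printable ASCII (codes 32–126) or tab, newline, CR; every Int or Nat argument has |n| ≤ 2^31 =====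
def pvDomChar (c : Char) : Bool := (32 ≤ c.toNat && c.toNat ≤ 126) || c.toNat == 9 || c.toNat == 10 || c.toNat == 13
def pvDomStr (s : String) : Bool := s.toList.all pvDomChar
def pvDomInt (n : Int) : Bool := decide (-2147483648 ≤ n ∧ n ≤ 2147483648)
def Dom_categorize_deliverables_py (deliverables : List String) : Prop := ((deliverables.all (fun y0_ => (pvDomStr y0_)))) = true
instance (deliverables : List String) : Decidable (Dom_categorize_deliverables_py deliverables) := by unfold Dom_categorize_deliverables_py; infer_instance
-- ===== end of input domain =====

-- B replaces A's elif-ladder single pass over a pre-built dict with a keyword table, a first-match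
-- category-index function, and one filter pass per bucket; same return value (objective: alternative).

-- ===== PORT A =====
def categorize_deliverables_py (deliverables : List String) : List (String × List String) :=
  let categories : PySem.Dict String (List String) := PySem.Dict.ofList
    [("Reports & Analysis", []), ("Creative Assets", []), ("Strategic Documents", []),
     ("Technical Deliverables", []), ("Other", [])]
  let final := deliverables.foldl (fun cats deliverable =>
    let dl := PySem.Str.lower deliverable
    if (["report", "analysis", "study", "audit"].any fun k => PySem.Str.isIn k dl) then
      cats.modify "Reports & Analysis" [] (fun v => v ++ [deliverable])
    else if (["creative", "design", "brand", "campaign", "materials"].any fun k => PySem.Str.isIn k dl) then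
      cats.modify "Creative Assets" [] (fun v => v ++ [deliverable])
    else if (["strategy", "plan", "roadmap", "framework"].any fun k => PySem.Str.isIn k dl) then
      cats.modify "Strategic Documents" [] (fun v => v ++ [deliverable])
    else if (["system", "platform", "tool", "software"].any fun k => PySem.Str.isIn k dl) then
      cats.modify "Technical Deliverables" [] (fun v => v ++ [deliverable])
    else
      cats.modify "Other" [] (fun v => v ++ [deliverable])) categories
  final.items.filter (fun kv => !kv.2.isEmpty)

-- ===== PORT B =====
def pvCategories : List (String × List String) :=
  [("Reports & Analysis", ["report", "analysis", "study", "audit"]),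
   ("Creative Assets", ["creative", "design", "brand", "campaign", "materials"]),
   ("Strategic Documents", ["strategy", "plan", "roadmap", "framework"]),
   ("Technical Deliverables", ["system", "platform", "tool", "software"])]

-- the 'for _, keywords in CATEGORIES: … i += 1' loop of _category_index, as structural recursion
def pvCategoryIndexGo (dl : String) : List (String × List String) → Int → Int
  | [], i => i
  | (_, kws) :: rest, i => if kws.any (fun k => PySem.Str.isIn k dl) then i else pvCategoryIndexGo dl rest (i + 1)

def pvCategoryIndex (deliverable : String) : Int :=
  pvCategoryIndexGo (PySem.Str.lower deliverable) pvCategories 0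

def categorize_deliverables_py_alt (deliverables : List String) : List (String × List String) :=
  let names := pvCategories.map Prod.fst ++ ["Other"]
  (PySem.List.enumerate names).foldl (fun result p =>
    let group := deliverables.filter (fun d => pvCategoryIndex d == p.1)
    if group.isEmpty then result else result ++ [(p.2, group)]) []

-- ===== PRECONDITION & SPEC =====
def Spec_categorize_deliverables_py (deliverables : List String) (out : List (String × List String)) : Prop := out = categorize_deliverables_py_alt deliverables
instance (deliverables : List String) (out : List (String × List String)) : Decidable (Spec_categorize_deliverables_py deliverables out) := by unfold Spec_categorize_deliverables_py; infer_instance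

-- ===== CLAIM (what is proved, stated in full; the proofs are below) =====
def Claim_equal_categorize_deliverables_py : Prop := ∀ (deliverables : List String), Dom_categorize_deliverables_py deliverables → Spec_categorize_deliverables_py deliverables (categorize_deliverables_py deliverables)



-- ===== LEMMAS AND PROOFS =====
-- proof-only names for A's loop body and initial dict (definitionally the ones inside the port)
def pvStepA (cats : PySem.Dict String (List String)) (deliverable : String) : PySem.Dict String (List String) :=
  let dl := PySem.Str.lower deliverable
  if (["report", "analysis", "study", "audit"].any fun k => PySem.Str.isIn k dl) then
    cats.modify "Reports & Analysis" [] (fun v => v ++ [deliverable])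
  else if (["creative", "design", "brand", "campaign", "materials"].any fun k => PySem.Str.isIn k dl) then
    cats.modify "Creative Assets" [] (fun v => v ++ [deliverable])
  else if (["strategy", "plan", "roadmap", "framework"].any fun k => PySem.Str.isIn k dl) then
    cats.modify "Strategic Documents" [] (fun v => v ++ [deliverable])
  else if (["system", "platform", "tool", "software"].any fun k => PySem.Str.isIn k dl) then
    cats.modify "Technical Deliverables" [] (fun v => v ++ [deliverable])
  else
    cats.modify "Other" [] (fun v => v ++ [deliverable])

lemma pvA_eq (ds : List String) :
    categorize_deliverables_py ds =
      (ds.foldl pvStepA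
        (PySem.Dict.mk [("Reports & Analysis", []), ("Creative Assets", []), ("Strategic Documents", []),
                        ("Technical Deliverables", []), ("Other", [])])).items.filter (fun kv => !kv.2.isEmpty) := rfl

def pvG (ds : List String) (i : Int) : List String := ds.filter (fun d => pvCategoryIndex d == i)

lemma pvCategoryIndex_eq (d : String) :
    pvCategoryIndex d =
      (if (["report", "analysis", "study", "audit"].any fun k => PySem.Str.isIn k (PySem.Str.lower d)) then 0
       else if (["creative", "design", "brand", "campaign", "materials"].any fun k => PySem.Str.isIn k (PySem.Str.lower d)) then 1
       else if (["strategy", "plan", "roadmap", "framework"].any fun k => PySem.Str.isIn k (PySem.Str.lower d)) then 2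
       else if (["system", "platform", "tool", "software"].any fun k => PySem.Str.isIn k (PySem.Str.lower d)) then 3
       else 4) := by
  simp [pvCategoryIndex, pvCategoryIndexGo, pvCategories]

lemma pvFold (ds : List String) (a0 a1 a2 a3 a4 : List String) :
    ds.foldl pvStepA
      (PySem.Dict.mk [("Reports & Analysis", a0), ("Creative Assets", a1), ("Strategic Documents", a2),
                      ("Technical Deliverables", a3), ("Other", a4)]) =
    PySem.Dict.mk [("Reports & Analysis", a0 ++ pvG ds 0), ("Creative Assets", a1 ++ pvG ds 1),
                   ("Strategic Documents", a2 ++ pvG ds 2), ("Technical Deliverables", a3 ++ pvG ds 3),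
                   ("Other", a4 ++ pvG ds 4)] := by
  induction ds generalizing a0 a1 a2 a3 a4 with
  | nil => simp [pvG]
  | cons d ds ih =>
    have hidx := pvCategoryIndex_eq d
    simp only [List.foldl_cons]
    by_cases h0 : (["report", "analysis", "study", "audit"].any fun k => PySem.Str.isIn k (PySem.Str.lower d)) = true
    · have hstep : pvStepA (PySem.Dict.mk [("Reports & Analysis", a0), ("Creative Assets", a1), ("Strategic Documents", a2),
          ("Technical Deliverables", a3), ("Other", a4)]) d =
          PySem.Dict.mk [("Reports & Analysis", a0 ++ [d]), ("Creative Assets", a1), ("Strategic Documents", a2),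
          ("Technical Deliverables", a3), ("Other", a4)] := by
        unfold pvStepA
        rw [if_pos h0]
        simp [PySem.Dict.modify, PySem.Dict.insert, PySem.Dict.getD, PySem.Dict.get?, PySem.Dict.contains]
      rw [hstep, ih]
      rw [if_pos h0] at hidx
      simp [pvG, hidx]
    · by_cases h1 : (["creative", "design", "brand", "campaign", "materials"].any fun k => PySem.Str.isIn k (PySem.Str.lower d)) = true
      · have hstep : pvStepA (PySem.Dict.mk [("Reports & Analysis", a0), ("Creative Assets", a1), ("Strategic Documents", a2),
            ("Technical Deliverables", a3), ("Other", a4)]) d =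
            PySem.Dict.mk [("Reports & Analysis", a0), ("Creative Assets", a1 ++ [d]), ("Strategic Documents", a2),
            ("Technical Deliverables", a3), ("Other", a4)] := by
          unfold pvStepA
          rw [if_neg h0, if_pos h1]
          simp [PySem.Dict.modify, PySem.Dict.insert, PySem.Dict.getD, PySem.Dict.get?, PySem.Dict.contains]
        rw [hstep, ih]
        rw [if_neg h0, if_pos h1] at hidx
        simp [pvG, hidx]
      · by_cases h2 : (["strategy", "plan", "roadmap", "framework"].any fun k => PySem.Str.isIn k (PySem.Str.lower d)) = true
        · have hstep : pvStepA (PySem.Dict.mk [("Reports & Analysis", a0), ("Creative Assets", a1), ("Strategic Documents", a2),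
              ("Technical Deliverables", a3), ("Other", a4)]) d =
              PySem.Dict.mk [("Reports & Analysis", a0), ("Creative Assets", a1), ("Strategic Documents", a2 ++ [d]),
              ("Technical Deliverables", a3), ("Other", a4)] := by
            unfold pvStepA
            rw [if_neg h0, if_neg h1, if_pos h2]
            simp [PySem.Dict.modify, PySem.Dict.insert, PySem.Dict.getD, PySem.Dict.get?, PySem.Dict.contains]
          rw [hstep, ih]
          rw [if_neg h0, if_neg h1, if_pos h2] at hidx
          simp [pvG, hidx]
        · by_cases h3 : (["system", "platform", "tool", "software"].any fun k => PySem.Str.isIn k (PySem.Str.lower d)) = true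
          · have hstep : pvStepA (PySem.Dict.mk [("Reports & Analysis", a0), ("Creative Assets", a1), ("Strategic Documents", a2),
                ("Technical Deliverables", a3), ("Other", a4)]) d =
                PySem.Dict.mk [("Reports & Analysis", a0), ("Creative Assets", a1), ("Strategic Documents", a2),
                ("Technical Deliverables", a3 ++ [d]), ("Other", a4)] := by
              unfold pvStepA
              rw [if_neg h0, if_neg h1, if_neg h2, if_pos h3]
              simp [PySem.Dict.modify, PySem.Dict.insert, PySem.Dict.getD, PySem.Dict.get?, PySem.Dict.contains]
            rw [hstep, ih]
            rw [if_neg h0, if_neg h1, if_neg h2, if_pos h3] at hidx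
            simp [pvG, hidx]
          · have hstep : pvStepA (PySem.Dict.mk [("Reports & Analysis", a0), ("Creative Assets", a1), ("Strategic Documents", a2),
                ("Technical Deliverables", a3), ("Other", a4)]) d =
                PySem.Dict.mk [("Reports & Analysis", a0), ("Creative Assets", a1), ("Strategic Documents", a2),
                ("Technical Deliverables", a3), ("Other", a4 ++ [d])] := by
              unfold pvStepA
              rw [if_neg h0, if_neg h1, if_neg h2, if_neg h3]
              simp [PySem.Dict.modify, PySem.Dict.insert, PySem.Dict.getD, PySem.Dict.get?, PySem.Dict.contains]
            rw [hstep, ih]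
            rw [if_neg h0, if_neg h1, if_neg h2, if_neg h3] at hidx
            simp [pvG, hidx]

-- ===== VERDICT (by name: the statement is the Claim_ definition above) =====
theorem categorize_deliverables_py_spec : Claim_equal_categorize_deliverables_py := by
  intro ds _
  show categorize_deliverables_py ds = categorize_deliverables_py_alt ds
  rw [pvA_eq, pvFold]
  unfold categorize_deliverables_py_alt
  simp only [pvCategories, List.map, List.nil_append, List.cons_append,
    PySem.List.enumerate_cons, PySem.List.enumerate_nil, List.foldl_cons, List.foldl_nil]
  simp only [Int.reduceAdd]
  simp only [pvG, List.filter_cons, List.filter_nil]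
  by_cases g0 : (List.filter (fun d => pvCategoryIndex d == (0:Int)) ds).isEmpty = true
  <;> by_cases g1 : (List.filter (fun d => pvCategoryIndex d == (1:Int)) ds).isEmpty = true
  <;> by_cases g2 : (List.filter (fun d => pvCategoryIndex d == (2:Int)) ds).isEmpty = true
  <;> by_cases g3 : (List.filter (fun d => pvCategoryIndex d == (3:Int)) ds).isEmpty = true
  <;> by_cases g4 : (List.filter (fun d => pvCategoryIndex d == (4:Int)) ds).isEmpty = true
  <;> simp only [Bool.not_eq_true] at g0 g1 g2 g3 g4
  <;> simp only [g0, g1, g2, g3, g4, Bool.not_true, Bool.not_false, if_true]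
  <;> try simp
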